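-- pv_equiv track=rewrite | github.com/heyitskevin/adventofcode | 2023/day_10/2.py | clean_maze
-- ===== SOURCE A (Python) =====
-- INVALID_CHARACTER ='0'
--
-- def clean_maze(maze, path_set): # used for printing
--     clean = []
--     for ixr, row in enumerate(maze):
--         clean_row = []
--         for ixc, col_elem in enumerate(row):
--             coord = (ixr, ixc)
--             elem = INVALID_CHARACTER
--             if coord in path_set or col_elem == 'S':
--                 elem = col_elem
--             clean_row.append(elem)
--         clean.append(clean_row)
--     return clean
-- ===== SOURCE B (Python) =====
-- INVALID_CHARACTER = '0'
--
-- def clean_maze(maze, path_set):  # used for printing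
--     # Build a grid of INVALID_CHARACTER, write back only the path cells, then restore 'S' cells.
--     clean = [[INVALID_CHARACTER] * len(row) for row in maze]
--     for r, c in path_set:
--         if 0 <= r < len(maze) and 0 <= c < len(maze[r]):
--             clean[r][c] = maze[r][c]
--     return [['S' if ch == 'S' else cl for ch, cl in zip(row, crow)]
--             for row, crow in zip(maze, clean)]
-- ===== Notes on version B (the rewrite author's own statement) =====
-- stated objective: alternative
-- what changed: Instead of testing every maze cell for membership in path_set (a list scan per cell), B builds a blank '0' grid, makes one writing pass over path_set putting each in-bounds path cell back, then restores 'S' cells in a zip pass.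
import Mathlib
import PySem

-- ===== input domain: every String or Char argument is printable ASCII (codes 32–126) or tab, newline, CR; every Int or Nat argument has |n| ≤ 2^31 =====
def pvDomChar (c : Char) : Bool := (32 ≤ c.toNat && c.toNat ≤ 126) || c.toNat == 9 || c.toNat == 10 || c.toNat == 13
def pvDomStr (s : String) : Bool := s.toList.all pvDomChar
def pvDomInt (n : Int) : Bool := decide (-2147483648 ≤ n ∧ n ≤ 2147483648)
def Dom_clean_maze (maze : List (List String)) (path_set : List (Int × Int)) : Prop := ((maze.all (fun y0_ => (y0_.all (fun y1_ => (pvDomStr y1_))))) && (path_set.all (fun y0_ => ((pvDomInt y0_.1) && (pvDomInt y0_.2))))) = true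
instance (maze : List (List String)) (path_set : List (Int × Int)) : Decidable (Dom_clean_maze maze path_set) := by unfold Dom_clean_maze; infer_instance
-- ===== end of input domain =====

-- B replaces A's per-cell membership scan of path_set by a blank '0' grid, a single writing
-- pass over path_set, and a zip pass restoring 'S' cells (objective: alternative).

-- ===== PORT A =====
def clean_maze (maze : List (List String)) (path_set : List (Int × Int)) : List (List String) :=
  (PySem.List.enumerate maze).map (fun rrow =>
    (PySem.List.enumerate rrow.2).map (fun ccol =>
      if (rrow.1, ccol.1) ∈ path_set ∨ ccol.2 = "S" then ccol.2 else "0"))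

-- ===== PORT B =====
-- one step of B's 'for r, c in path_set' loop: write maze[r][c] back if (r,c) is in bounds
def pvMarkPath (maze : List (List String)) (g : List (List String)) (p : Int × Int) : List (List String) :=
  if 0 ≤ p.1 ∧ p.1 < maze.length ∧ 0 ≤ p.2 ∧ p.2 < ((maze[p.1.toNat]?).getD []).length then
    g.modify p.1.toNat (fun row => row.set p.2.toNat ((((maze[p.1.toNat]?).getD [])[p.2.toNat]?).getD "0"))
  else g

def clean_maze_alt (maze : List (List String)) (path_set : List (Int × Int)) : List (List String) :=
  let clean0 := maze.map (fun row => row.map (fun _ => "0"))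
  let clean1 := path_set.foldl (pvMarkPath maze) clean0
  List.zipWith (fun row crow =>
    List.zipWith (fun ch cl => if ch = "S" then "S" else cl) row crow) maze clean1

-- ===== PRECONDITION & SPEC =====
def Spec_clean_maze (maze : List (List String)) (path_set : List (Int × Int)) (out : List (List String)) : Prop := out = clean_maze_alt maze path_set
instance (maze : List (List String)) (path_set : List (Int × Int)) (out : List (List String)) : Decidable (Spec_clean_maze maze path_set out) := by unfold Spec_clean_maze; infer_instance

-- ===== CLAIM (what is proved, stated in full; the proofs are below) =====
def Claim_equal_clean_maze : Prop := ∀ (maze : List (List String)) (path_set : List (Int × Int)), Dom_clean_maze maze path_set → Spec_clean_maze maze path_set (clean_maze maze path_set)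

-- ===== LEMMAS AND PROOFS =====

-- the entry of the grid g at row r, column c (none if out of range)
def pvCell (g : List (List String)) (r c : Nat) : Option String :=
  (g[r]?).bind (fun row => row[c]?)

theorem pvMarkPath_shape (maze g : List (List String)) (p : Int × Int) (i : Nat) :
    ((pvMarkPath maze g p)[i]?).map List.length = (g[i]?).map List.length := by
  unfold pvMarkPath
  split_ifs with h
  · rw [List.getElem?_modify]
    cases g[i]? with
    | none => rfl
    | some row => simp only [Option.map_some]; split_ifs <;> simp
  · rfl

theorem pvMarkPath_cell (maze g : List (List String)) (p : Int × Int) (r c : Nat)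
    (hr : r < maze.length) (hc : c < ((maze[r]?).getD []).length)
    (hg : (g[r]?).map List.length = (maze[r]?).map List.length) :
    pvCell (pvMarkPath maze g p) r c =
      if p = ((r : Int), (c : Int)) then ((maze[r]?).getD [])[c]? else pvCell g r c := by
  obtain ⟨mrow, hm⟩ : ∃ mrow, maze[r]? = some mrow := by
    exact ⟨maze[r]'hr, List.getElem?_eq_getElem hr⟩
  obtain ⟨grow, hgr, hlen⟩ : ∃ grow, g[r]? = some grow ∧ grow.length = mrow.length := by
    rw [hm] at hg
    cases hq : g[r]? with
    | none => rw [hq] at hg; simp at hg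
    | some grow => rw [hq] at hg; simp at hg; exact ⟨grow, rfl, hg⟩
  rw [hm] at hc; simp only [Option.getD_some] at hc
  unfold pvMarkPath pvCell
  by_cases hp : p = ((r : Int), (c : Int))
  · subst hp
    have h1 : ((r : Int)).toNat = r := Int.toNat_natCast r
    have h2 : ((c : Int)).toNat = c := Int.toNat_natCast c
    rw [if_pos ⟨Int.natCast_nonneg r, by simp only; exact_mod_cast hr, Int.natCast_nonneg c,
        by simp only [h1, hm]; exact_mod_cast hc⟩]
    rw [if_pos rfl, List.getElem?_modify, h1, h2, hgr]
    simp only [Option.map_eq_map, Option.map_some, Option.bind_some, hm,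
      Option.getD_some, if_true]
    rw [List.getElem?_set_self (by omega)]
    have : mrow[c]? = some (mrow[c]'hc) := List.getElem?_eq_getElem hc
    simp [this]
  · rw [if_neg hp]
    split_ifs with hb
    · -- p in bounds but p ≠ (r,c): the write lands elsewhere
      obtain ⟨hb1, hb2, hb3, hb4⟩ := hb
      rw [List.getElem?_modify, hgr]
      simp only [Option.map_eq_map, Option.map_some, Option.bind_some]
      by_cases hrr : p.1.toNat = r
      · have hpne : p.2.toNat ≠ c := by
          intro hcc
          exact hp (Prod.ext (by omega) (by omega))
        rw [if_pos hrr, List.getElem?_set_ne hpne]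
      · rw [if_neg hrr]
    · rfl

theorem pvFold_shape (maze : List (List String)) (ps : List (Int × Int)) :
    ∀ (g : List (List String)) (i : Nat),
      ((ps.foldl (pvMarkPath maze) g)[i]?).map List.length = (g[i]?).map List.length := by
  induction ps with
  | nil => intro g i; rfl
  | cons p ps ih =>
    intro g i
    rw [List.foldl_cons, ih, pvMarkPath_shape]

theorem pvFold_cell (maze : List (List String)) (ps : List (Int × Int)) (r c : Nat)
    (hr : r < maze.length) (hc : c < ((maze[r]?).getD []).length) :
    ∀ (g : List (List String)),
      ((g[r]?).map List.length = (maze[r]?).map List.length) →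
      pvCell (ps.foldl (pvMarkPath maze) g) r c =
        if ((r : Int), (c : Int)) ∈ ps then ((maze[r]?).getD [])[c]? else pvCell g r c := by
  induction ps with
  | nil => intro g _; simp
  | cons p ps ih =>
    intro g hg
    rw [List.foldl_cons]
    rw [ih (pvMarkPath maze g p) (by rw [pvMarkPath_shape]; exact hg)]
    rw [pvMarkPath_cell maze g p r c hr hc hg]
    by_cases hmem : ((r : Int), (c : Int)) ∈ ps
    · simp [hmem, List.mem_cons]
    · by_cases hp : p = ((r : Int), (c : Int)) <;>
        simp [hmem, hp, List.mem_cons, eq_comm]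

theorem clean_maze_eq_alt (maze : List (List String)) (ps : List (Int × Int)) :
    clean_maze maze ps = clean_maze_alt maze ps := by
  unfold clean_maze clean_maze_alt
  apply List.ext_getElem?
  intro r
  rw [List.getElem?_map, PySem.List.getElem?_enumerate, List.getElem?_zipWith']
  cases hm : maze[r]? with
  | none => simp
  | some row =>
    have hr : r < maze.length := by
      obtain ⟨h, -⟩ := List.getElem?_eq_some_iff.mp hm; exact h
    have hc1 : ((ps.foldl (pvMarkPath maze) (maze.map (fun row => row.map fun _ => "0")))[r]?).map List.length = some row.length := by
      rw [pvFold_shape, List.getElem?_map, hm]; simp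
    obtain ⟨crow, hcr, hclen⟩ : ∃ crow,
        (ps.foldl (pvMarkPath maze) (maze.map (fun row => row.map fun _ => "0")))[r]? = some crow ∧ crow.length = row.length := by
      cases hq : (ps.foldl (pvMarkPath maze) (maze.map (fun row => row.map fun _ => "0")))[r]? with
      | none => rw [hq] at hc1; simp at hc1
      | some crow => rw [hq] at hc1; simp at hc1; exact ⟨crow, rfl, hc1⟩
    rw [hcr]
    simp only [Option.map_some, Option.bind_some]
    congr 1
    apply List.ext_getElem?
    intro c
    rw [List.getElem?_map, PySem.List.getElem?_enumerate, List.getElem?_zipWith']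
    cases hx : row[c]? with
    | none => simp
    | some x =>
      have hcc : c < row.length := by
        obtain ⟨h, -⟩ := List.getElem?_eq_some_iff.mp hx; exact h
      have hmc : c < ((maze[r]?).getD []).length := by rw [hm]; simpa using hcc
      have hcell : pvCell (ps.foldl (pvMarkPath maze) (maze.map (fun row => row.map fun _ => "0"))) r c =
          if ((r : Int), (c : Int)) ∈ ps then ((maze[r]?).getD [])[c]? else some "0" := by
        rw [pvFold_cell maze ps r c hr hmc _
            (by rw [List.getElem?_map, hm]; simp)]
        congr 1
        unfold pvCell
        rw [List.getElem?_map, hm]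
        simp [hcc]
      rw [pvCell, hcr] at hcell
      simp only [Option.bind_some] at hcell
      rw [hm] at hcell
      simp only [Option.getD_some, hx] at hcell
      rw [hcell]
      by_cases hmem : ((r : Int), (c : Int)) ∈ ps <;>
        by_cases hS : x = "S" <;>
          simp [hmem, hS]

-- ===== VERDICT (by name: the statement is the Claim_ definition above) =====
theorem clean_maze_spec : Claim_equal_clean_maze := by
  intro maze path_set _
  unfold Spec_clean_maze
  exact clean_maze_eq_alt maze path_set
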